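-- pv_equiv track=rewrite | github.com/rreusch2/pyscripts | teams_enhanced.py | _format_sport_distribution_requirements
-- ===== SOURCE A (Python) =====
-- from typing import List, Dict, Any, Optional
--
-- def _format_sport_distribution_requirements(sport_distribution: Dict[str, int], target_picks: int) -> str:
--     """Generate dynamic pick distribution requirements based on available sports and games"""
--     if not sport_distribution:
--         return f"- Generate EXACTLY {target_picks} total picks across all available sports"
--
--     # Filter out sports with 0 picks
--     active_sports = {sport: picks for sport, picks in sport_distribution.items() if picks > 0}
--
--     if not active_sports:
--         return f"- Generate EXACTLY {target_picks} total picks across all available sports"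
--
--     requirements = []
--     total_expected = sum(active_sports.values())
--
--     # Generate requirements for each sport
--     sport_order = ["NFL", "NHL", "MLB", "WNBA", "CFB", "MMA"]  # Include CFB and NHL explicitly
--     for sport in sport_order:
--         if sport in active_sports:
--             picks_count = active_sports[sport]
--             requirements.append(f"- Generate EXACTLY {picks_count} {sport} team picks")
--
--     # Add any sports not in the preferred order
--     for sport, picks_count in active_sports.items():
--         if sport not in sport_order:
--             requirements.append(f"- Generate EXACTLY {picks_count} {sport} team picks")
--
--     requirements.append(f"- TOTAL: Generate EXACTLY {total_expected} picks across all sports")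
--     requirements.append("- Focus on generating the FULL amount for each sport to maximize frontend filtering options")
--
--     return "\n".join(requirements)
-- ===== SOURCE B (Python) =====
-- def _format_sport_distribution_requirements(sport_distribution, target_picks):
--     """Same requirements string, built by one stable sort of the active sports instead of two scans."""
--     if not sport_distribution:
--         return f"- Generate EXACTLY {target_picks} total picks across all available sports"
--
--     active_sports = {sport: picks for sport, picks in sport_distribution.items() if picks > 0}
--
--     if not active_sports:
--         return f"- Generate EXACTLY {target_picks} total picks across all available sports"
--
--     sport_order = ["NFL", "NHL", "MLB", "WNBA", "CFB", "MMA"]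
--
--     def rank(sport):
--         return sport_order.index(sport) if sport in sport_order else len(sport_order)
--
--     lines = [f"- Generate EXACTLY {active_sports[sport]} {sport} team picks"
--              for sport in sorted(active_sports, key=rank)]
--     lines.append(f"- TOTAL: Generate EXACTLY {sum(active_sports.values())} picks across all sports")
--     lines.append("- Focus on generating the FULL amount for each sport to maximize frontend filtering options")
--     return "\n".join(lines)
-- ===== Notes on version B (the rewrite author's own statement) =====
-- stated objective: alternative
-- what changed: A orders the active sports by one scan over the preferred sport_order list followed by a second scan over the dict for leftovers; B obtains the same order with a single stable sort of the active sports keyed by position in sport_order (unknown sports rank last), then emits all lines in one list-comprehension pass.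
import Mathlib
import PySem

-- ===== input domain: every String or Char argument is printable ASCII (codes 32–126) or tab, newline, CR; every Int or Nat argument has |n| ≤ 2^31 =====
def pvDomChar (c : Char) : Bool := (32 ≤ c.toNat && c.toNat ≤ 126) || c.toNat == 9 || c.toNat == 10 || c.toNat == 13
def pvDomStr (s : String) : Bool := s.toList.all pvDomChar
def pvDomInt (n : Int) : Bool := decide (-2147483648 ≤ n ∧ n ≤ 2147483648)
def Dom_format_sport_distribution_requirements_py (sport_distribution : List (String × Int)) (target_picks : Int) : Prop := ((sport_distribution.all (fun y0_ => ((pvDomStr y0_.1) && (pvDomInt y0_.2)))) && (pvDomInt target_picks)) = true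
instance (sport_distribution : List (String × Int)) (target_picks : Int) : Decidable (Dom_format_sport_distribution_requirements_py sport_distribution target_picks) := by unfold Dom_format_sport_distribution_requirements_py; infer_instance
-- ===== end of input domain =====

-- B builds the sport order by ONE stable sort of the active sports (keyed by position in sport_order,
-- unknown sports last) instead of A's two scans; alternative decomposition, same return value.

-- ===== PORT A =====
-- shared f-string / constant helpers (the identical literals appear in both Pythons)
def pvFallback (target_picks : Int) : String :=
  PySem.Str.join "" ["- Generate EXACTLY ", PySem.Int.toStr target_picks, " total picks across all available sports"]

def pvPickLine (picks : Int) (sport : String) : String :=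
  PySem.Str.join "" ["- Generate EXACTLY ", PySem.Int.toStr picks, " ", sport, " team picks"]

def pvTotalLine (total : Int) : String :=
  PySem.Str.join "" ["- TOTAL: Generate EXACTLY ", PySem.Int.toStr total, " picks across all sports"]

def pvFocusLine : String :=
  "- Focus on generating the FULL amount for each sport to maximize frontend filtering options"

def pvSportOrder : List String := ["NFL", "NHL", "MLB", "WNBA", "CFB", "MMA"]

-- the dict comprehension {sport: picks for sport, picks in sport_distribution.items() if picks > 0}
-- (identical in A and B)
def pvActive (sport_distribution : List (String × Int)) : PySem.Dict String Int :=
  sport_distribution.foldl (fun d p => if p.2 > 0 then d.insert p.1 p.2 else d) PySem.Dict.empty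

def format_sport_distribution_requirements_py (sport_distribution : List (String × Int)) (target_picks : Int) : String :=
  if sport_distribution = [] then pvFallback target_picks
  else
    let act := pvActive sport_distribution
    if act.items = [] then pvFallback target_picks
    else
      let total := act.values.sum
      let reqs1 := pvSportOrder.foldl
        (fun acc sport => if act.contains sport then acc ++ [pvPickLine (act.getD sport 0) sport] else acc)
        ([] : List String)
      let reqs2 := act.items.foldl
        (fun acc p => if !(pvSportOrder.contains p.1) then acc ++ [pvPickLine p.2 p.1] else acc)
        reqs1
      PySem.Str.join "\n" (reqs2 ++ [pvTotalLine total, pvFocusLine])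

-- ===== PORT B =====
-- rank(sport) = sport_order.index(sport) if sport in sport_order else len(sport_order)
def pvRank (sport : String) : Int :=
  if pvSportOrder.contains sport then (((PySem.List.index? pvSportOrder sport).getD 0 : Nat) : Int)
  else (pvSportOrder.length : Int)

def format_sport_distribution_requirements_py_alt (sport_distribution : List (String × Int)) (target_picks : Int) : String :=
  if sport_distribution = [] then pvFallback target_picks
  else
    let act := pvActive sport_distribution
    if act.items = [] then pvFallback target_picks
    else
      let lines := (PySem.List.sorted act.keys pvRank false).map
        (fun sport => pvPickLine (act.getD sport 0) sport)
      PySem.Str.join "\n" (lines ++ [pvTotalLine act.values.sum, pvFocusLine])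

-- ===== PRECONDITION & SPEC =====
def Spec_format_sport_distribution_requirements_py (sport_distribution : List (String × Int)) (target_picks : Int) (out : String) : Prop := out = format_sport_distribution_requirements_py_alt sport_distribution target_picks
instance (sport_distribution : List (String × Int)) (target_picks : Int) (out : String) : Decidable (Spec_format_sport_distribution_requirements_py sport_distribution target_picks out) := by unfold Spec_format_sport_distribution_requirements_py; infer_instance

-- ===== CLAIM (what is proved, stated in full; the proofs are below) =====
def Claim_equal_format_sport_distribution_requirements_py : Prop := ∀ (sport_distribution : List (String × Int)) (target_picks : Int), Dom_format_sport_distribution_requirements_py sport_distribution target_picks → Spec_format_sport_distribution_requirements_py sport_distribution target_picks (format_sport_distribution_requirements_py sport_distribution target_picks)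

-- ===== LEMMAS AND PROOFS =====

-- keys of the active dict are distinct
lemma pvActive_keys_nodup (sd : List (String × Int)) : (pvActive sd).keys.Nodup := by
  unfold pvActive
  rw [PySem.List.foldl_ite_eq_foldl_filter]
  exact PySem.Dict.nodup_keys_foldl_insert_key _ Prod.fst (fun d p => p.2) _ (by simp)

lemma pvRank_le (s : String) : pvRank s ≤ 6 := by
  unfold pvRank
  split_ifs with h
  · rcases hidx : PySem.List.index? pvSportOrder s with _ | i
    · simp
    · obtain ⟨hk, -, -⟩ := PySem.List.getElem_of_index?_eq_some hidx
      simp only [Option.getD_some]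
      have : i < 6 := by simpa [pvSportOrder] using hk
      omega
  · simp [pvSportOrder]

lemma pvRank_of_not_mem (s : String) (h : s ∉ pvSportOrder) : pvRank s = 6 := by
  unfold pvRank
  rw [if_neg (by simpa using h)]
  simp [pvSportOrder]

lemma pvRank_lt_of_mem (s : String) (h : s ∈ pvSportOrder) : pvRank s < 6 := by
  fin_cases h <;> decide

-- insertBy with key pvRank drops x exactly between the small-key prefix and the large-key suffix
lemma pvInsertBy_split (x : String) (l₁ l₂ : List String)
    (h₁ : ∀ y ∈ l₁, ¬ pvRank x < pvRank y) (h₂ : ∀ y ∈ l₂, pvRank x < pvRank y) :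
    PySem.List.insertBy (fun a b => decide (pvRank a < pvRank b)) x (l₁ ++ l₂) = l₁ ++ x :: l₂ := by
  induction l₁ with
  | nil =>
    cases l₂ with
    | nil => rfl
    | cons y ys => simp [PySem.List.insertBy, h₂ y (by simp)]
  | cons a l ih =>
    simp only [List.cons_append, PySem.List.insertBy]
    rw [if_neg (by simpa using h₁ a (by simp))]
    simp only [List.cons.injEq, true_and]
    exact ih (fun y hy => h₁ y (by simp [hy]))

-- one insertion step, x a preferred sport: pvSportOrder = o₁ ++ x :: o₂
lemma pvStep_mem (ks : List String) (x : String) (o₁ o₂ : List String)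
    (hsplit : pvSportOrder = o₁ ++ x :: o₂)
    (h₁ : ∀ y ∈ o₁, pvRank y < pvRank x) (h₂ : ∀ y ∈ o₂, pvRank x < pvRank y)
    (hxks : x ∉ ks) :
    PySem.List.insertBy (fun a b => decide (pvRank a < pvRank b)) x
      (pvSportOrder.filter (fun s => decide (s ∈ ks)) ++ ks.filter (fun s => !pvSportOrder.contains s))
    = pvSportOrder.filter (fun s => decide (s ∈ ks ++ [x])) ++ (ks ++ [x]).filter (fun s => !pvSportOrder.contains s) := by
  have hxo₁ : x ∉ o₁ := fun hm => lt_irrefl _ (h₁ x hm)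
  have hxo₂ : x ∉ o₂ := fun hm => lt_irrefl _ (h₂ x hm)
  have hxmem : x ∈ pvSportOrder := by rw [hsplit]; simp
  have hxrank : pvRank x < 6 := pvRank_lt_of_mem x hxmem
  have hcx : pvSportOrder.contains x = true := by simpa using hxmem
  have ho₁ : o₁.filter (fun s => decide (s ∈ ks ++ [x])) = o₁.filter (fun s => decide (s ∈ ks)) := by
    refine List.filter_congr fun a ha => ?_
    have hax : a ≠ x := fun h => hxo₁ (h ▸ ha)
    simp [hax]
  have ho₂ : o₂.filter (fun s => decide (s ∈ ks ++ [x])) = o₂.filter (fun s => decide (s ∈ ks)) := by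
    refine List.filter_congr fun a ha => ?_
    have hax : a ≠ x := fun h => hxo₂ (h ▸ ha)
    simp [hax]
  have hL : pvSportOrder.filter (fun s => decide (s ∈ ks))
      = o₁.filter (fun s => decide (s ∈ ks)) ++ o₂.filter (fun s => decide (s ∈ ks)) := by
    rw [hsplit]; simp [List.filter_append, hxks]
  have hR : pvSportOrder.filter (fun s => decide (s ∈ ks ++ [x]))
      = o₁.filter (fun s => decide (s ∈ ks)) ++ x :: o₂.filter (fun s => decide (s ∈ ks)) := by
    rw [hsplit, List.filter_append, List.filter_cons, ho₁, ho₂]; simp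
  have hU : (ks ++ [x]).filter (fun s => !pvSportOrder.contains s)
      = ks.filter (fun s => !pvSportOrder.contains s) := by
    simp [List.filter_append, hxmem]
  rw [hL, hR, hU, List.append_assoc,
    pvInsertBy_split x _ (o₂.filter (fun s => decide (s ∈ ks)) ++ ks.filter (fun s => !pvSportOrder.contains s))
      (fun y hy => not_lt_of_gt (h₁ y (List.mem_of_mem_filter hy)))
      (fun y hy => by
        rcases List.mem_append.1 hy with hy | hy
        · exact h₂ y (List.mem_of_mem_filter hy)
        · have hyo : y ∉ pvSportOrder := by
            have := List.of_mem_filter hy; simpa using this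
          rw [pvRank_of_not_mem y hyo]; exact hxrank)]
  simp

lemma pvSorted_rank (ks : List String) (h : ks.Nodup) :
    PySem.List.sorted ks pvRank false
    = pvSportOrder.filter (fun s => decide (s ∈ ks)) ++ ks.filter (fun s => !pvSportOrder.contains s) := by
  rw [PySem.List.sorted_eq_foldl_insertBy]
  induction ks using List.reverseRecOn with
  | nil => simp
  | append_singleton ks x ih =>
    obtain ⟨hk, -, hdisj⟩ := List.nodup_append.mp h
    have hxks : x ∉ ks := fun hm => hdisj x hm x (by simp) rfl
    rw [List.foldl_append]
    simp only [List.foldl_cons, List.foldl_nil]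
    rw [ih hk]
    by_cases hmem : x ∈ pvSportOrder
    · have hx6 : x = "NFL" ∨ x = "NHL" ∨ x = "MLB" ∨ x = "WNBA" ∨ x = "CFB" ∨ x = "MMA" := by
        simpa [pvSportOrder] using hmem
      rcases hx6 with rfl | rfl | rfl | rfl | rfl | rfl
      · exact pvStep_mem ks _ [] ["NHL", "MLB", "WNBA", "CFB", "MMA"] rfl (by decide) (by decide) hxks
      · exact pvStep_mem ks _ ["NFL"] ["MLB", "WNBA", "CFB", "MMA"] rfl (by decide) (by decide) hxks
      · exact pvStep_mem ks _ ["NFL", "NHL"] ["WNBA", "CFB", "MMA"] rfl (by decide) (by decide) hxks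
      · exact pvStep_mem ks _ ["NFL", "NHL", "MLB"] ["CFB", "MMA"] rfl (by decide) (by decide) hxks
      · exact pvStep_mem ks _ ["NFL", "NHL", "MLB", "WNBA"] ["MMA"] rfl (by decide) (by decide) hxks
      · exact pvStep_mem ks _ ["NFL", "NHL", "MLB", "WNBA", "CFB"] [] rfl (by decide) (by decide) hxks
    · have h6 : pvRank x = 6 := pvRank_of_not_mem x hmem
      rw [PySem.List.insertBy_of_forall_not_before _ x _ (fun y _ => by
        simp only [decide_eq_false_iff_not, not_lt, h6]; exact pvRank_le y)]
      have hOF : pvSportOrder.filter (fun s => decide (s ∈ ks ++ [x]))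
          = pvSportOrder.filter (fun s => decide (s ∈ ks)) := by
        refine List.filter_congr fun a ha => ?_
        have hax : a ≠ x := fun hh => hmem (hh ▸ ha)
        simp [hax]
      rw [hOF]
      simp [List.filter_append, hmem]

-- ===== VERDICT (by name: the statement is the Claim_ definition above) =====
theorem format_sport_distribution_requirements_py_spec : Claim_equal_format_sport_distribution_requirements_py := by
  unfold Claim_equal_format_sport_distribution_requirements_py
  intro sd tp _
  unfold Spec_format_sport_distribution_requirements_py
  unfold format_sport_distribution_requirements_py format_sport_distribution_requirements_py_alt
  by_cases h0 : sd = []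
  · simp [h0]
  · simp only [if_neg h0]
    by_cases h1 : (pvActive sd).items = []
    · simp [h1]
    · simp only [if_neg h1]
      have hnd : (pvActive sd).keys.Nodup := pvActive_keys_nodup sd
      congr 1
      rw [PySem.List.foldl_append_if, PySem.List.foldl_append_if,
        pvSorted_rank (pvActive sd).keys hnd, List.map_append]
      congr 1
      congr 1
      · -- preferred-order part
        have : pvSportOrder.filter (fun s => (pvActive sd).contains s)
            = pvSportOrder.filter (fun s => decide (s ∈ (pvActive sd).keys)) := by
          refine List.filter_congr fun a _ => ?_
          rw [PySem.Dict.contains_eq_decide_mem_keys]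
        simp [this]
      · -- leftover part
        rw [PySem.Dict.items_eq_map_keys (pvActive sd) hnd 0, List.filter_map, List.map_map]
        rfl
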